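-- pv_equiv track=rewrite | github.com/alexandraback/datacollection | solutions_2749486_0/Python/luke23/b.py | f
-- ===== SOURCE A (Python) =====
-- def f(a,b):
-- 	x=0
-- 	y=0
-- 	st=""
-- 	s=1
-- 	while x!=a:
-- 		d=x-a
-- 		if d>0:
-- 			st+="E"
-- 			x+=s
-- 			s+=1
-- 			st+="W"
-- 			x-=s
-- 			s+=1
-- 		else:
-- 			st+="W"
-- 			x-=s
-- 			s+=1
-- 			st+="E"
-- 			x+=s
-- 			s+=1
-- 	while y!=b:
-- 		d=y-b
-- 		if d>0:
-- 			st+="N"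
-- 			y+=s
-- 			s+=1
-- 			st+="S"
-- 			y-=s
-- 			s+=1
-- 		else:
-- 			st+="S"
-- 			y-=s
-- 			s+=1
-- 			st+="N"
-- 			y+=s
-- 			s+=1
-- 	return st
-- ===== SOURCE B (Python) =====
-- def f(a, b):
--     if a > 0:
--         xs = "WE" * a
--     elif a < 0:
--         xs = "EW" * (-a)
--     else:
--         xs = ""
--     if b > 0:
--         ys = "SN" * b
--     elif b < 0:
--         ys = "NS" * (-b)
--     else:
--         ys = ""
--     return xs + ys
-- ===== Notes on version B (the rewrite author's own statement) =====
-- stated objective: simpler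
-- what changed: Replaced the two while-loops (which track position x/y and a growing step size s whose net effect per iteration is just one +-1 step and two fixed letters) by direct string repetition: 'WE'*a / 'EW'*(-a) for x and 'SN'*b / 'NS'*(-b) for y, concatenated.
import Mathlib
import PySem

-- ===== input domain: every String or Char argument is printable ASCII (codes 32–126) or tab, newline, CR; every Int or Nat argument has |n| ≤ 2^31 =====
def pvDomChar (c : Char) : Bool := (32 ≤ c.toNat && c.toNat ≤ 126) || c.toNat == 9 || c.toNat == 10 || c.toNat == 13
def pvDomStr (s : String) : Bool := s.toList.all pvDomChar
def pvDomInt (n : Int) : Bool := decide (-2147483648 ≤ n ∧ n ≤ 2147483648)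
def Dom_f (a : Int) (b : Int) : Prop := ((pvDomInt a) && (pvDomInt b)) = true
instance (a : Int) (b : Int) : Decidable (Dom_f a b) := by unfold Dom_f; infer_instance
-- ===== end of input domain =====

-- B replaces A's two step-by-step while-loops by direct string repetition ("WE"*a etc.): simpler, no loop, no position/step tracking.

-- ===== PORT A =====
-- while x != a: each iteration nets x one step toward a and appends two letters
def fLoopX (a : Int) (x : Int) (s : Int) (st : String) : String × Int :=
  if _h : x = a then (st, s)
  else
    let d := x - a
    if d > 0 then
      let st1 := st ++ "E"
      let x1 := x + s
      let s1 := s + 1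
      let st2 := st1 ++ "W"
      let x2 := x1 - s1
      let s2 := s1 + 1
      fLoopX a x2 s2 st2
    else
      let st1 := st ++ "W"
      let x1 := x - s
      let s1 := s + 1
      let st2 := st1 ++ "E"
      let x2 := x1 + s1
      let s2 := s1 + 1
      fLoopX a x2 s2 st2
termination_by (a - x).natAbs
decreasing_by all_goals omega

def fLoopY (b : Int) (y : Int) (s : Int) (st : String) : String × Int :=
  if _h : y = b then (st, s)
  else
    let d := y - b
    if d > 0 then
      let st1 := st ++ "N"
      let y1 := y + s
      let s1 := s + 1
      let st2 := st1 ++ "S"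
      let y2 := y1 - s1
      let s2 := s1 + 1
      fLoopY b y2 s2 st2
    else
      let st1 := st ++ "S"
      let y1 := y - s
      let s1 := s + 1
      let st2 := st1 ++ "N"
      let y2 := y1 + s1
      let s2 := s1 + 1
      fLoopY b y2 s2 st2
termination_by (b - y).natAbs
decreasing_by all_goals omega

def f (a : Int) (b : Int) : String :=
  let r1 := fLoopX a 0 1 ""
  let r2 := fLoopY b 0 r1.2 r1.1
  r2.1

-- ===== PORT B =====
-- Python string repetition u * n
def repStr (u : String) (n : Nat) : String :=
  match n with
  | 0 => ""
  | Nat.succ m => u ++ repStr u m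

def f_alt (a : Int) (b : Int) : String :=
  (if a > 0 then repStr "WE" a.toNat
   else if a < 0 then repStr "EW" (-a).toNat
   else "")
  ++
  (if b > 0 then repStr "SN" b.toNat
   else if b < 0 then repStr "NS" (-b).toNat
   else "")

-- ===== PRECONDITION & SPEC =====
def Spec_f (a : Int) (b : Int) (out : String) : Prop := out = f_alt a b
instance (a : Int) (b : Int) (out : String) : Decidable (Spec_f a b out) := by unfold Spec_f; infer_instance

-- ===== CLAIM (what is proved, stated in full; the proofs are below) =====
def Claim_equal_f : Prop := ∀ (a : Int) (b : Int), Dom_f a b → Spec_f a b (f a b)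

-- ===== LEMMAS AND PROOFS =====

theorem append_unit (st c d u r : String) (h : c ++ d = u) :
    st ++ c ++ d ++ r = st ++ (u ++ r) := by
  subst h; simp [String.append_assoc]

theorem loopX_eq (n : Nat) : ∀ (a x s : Int) (st : String), (a - x).natAbs = n →
    fLoopX a x s st = (st ++ (if x < a then repStr "WE" n else repStr "EW" n), s + 2 * n) := by
  induction n with
  | zero =>
    intro a x s st h
    have hx : x = a := by omega
    rw [fLoopX]
    simp [hx, repStr]
  | succ m ih =>
    intro a x s st h
    have hx : x ≠ a := by omega
    rw [fLoopX]
    simp only [dif_neg hx]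
    by_cases hd : x - a > 0
    · -- x > a : "EW" step, x decreases by 1
      simp only [if_pos hd]
      have h2 : (a - (x + s - (s + 1))).natAbs = m := by omega
      rw [ih a _ _ _ h2]
      have hx2 : ¬ (x + s - (s + 1) < a) := by omega
      have hxlt : ¬ (x < a) := by omega
      simp only [if_neg hx2, if_neg hxlt, Prod.mk.injEq]
      refine ⟨?_, ?_⟩
      · exact append_unit st "E" "W" "EW" (repStr "EW" m) (by decide)
      · push_cast; ring
    · -- x < a : "WE" step, x increases by 1
      simp only [if_neg hd]
      have hxa : x < a := by omega
      have h2 : (a - (x - s + (s + 1))).natAbs = m := by omega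
      rw [ih a _ _ _ h2]
      have heq : (if x - s + (s + 1) < a then repStr "WE" m else repStr "EW" m) = repStr "WE" m := by
        by_cases h3 : x - s + (s + 1) < a
        · simp [h3]
        · have : m = 0 := by omega
          simp [this, repStr]
      rw [heq]
      simp only [if_pos hxa, Prod.mk.injEq]
      refine ⟨?_, ?_⟩
      · exact append_unit st "W" "E" "WE" (repStr "WE" m) (by decide)
      · push_cast; ring

theorem loopY_eq (n : Nat) : ∀ (b y s : Int) (st : String), (b - y).natAbs = n →
    fLoopY b y s st = (st ++ (if y < b then repStr "SN" n else repStr "NS" n), s + 2 * n) := by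
  induction n with
  | zero =>
    intro b y s st h
    have hy : y = b := by omega
    rw [fLoopY]
    simp [hy, repStr]
  | succ m ih =>
    intro b y s st h
    have hy : y ≠ b := by omega
    rw [fLoopY]
    simp only [dif_neg hy]
    by_cases hd : y - b > 0
    · simp only [if_pos hd]
      have h2 : (b - (y + s - (s + 1))).natAbs = m := by omega
      rw [ih b _ _ _ h2]
      have hy2 : ¬ (y + s - (s + 1) < b) := by omega
      have hylt : ¬ (y < b) := by omega
      simp only [if_neg hy2, if_neg hylt, Prod.mk.injEq]
      refine ⟨?_, ?_⟩
      · exact append_unit st "N" "S" "NS" (repStr "NS" m) (by decide)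
      · push_cast; ring
    · simp only [if_neg hd]
      have hyb : y < b := by omega
      have h2 : (b - (y - s + (s + 1))).natAbs = m := by omega
      rw [ih b _ _ _ h2]
      have heq : (if y - s + (s + 1) < b then repStr "SN" m else repStr "NS" m) = repStr "SN" m := by
        by_cases h3 : y - s + (s + 1) < b
        · simp [h3]
        · have : m = 0 := by omega
          simp [this, repStr]
      rw [heq]
      simp only [if_pos hyb, Prod.mk.injEq]
      refine ⟨?_, ?_⟩
      · exact append_unit st "S" "N" "SN" (repStr "SN" m) (by decide)
      · push_cast; ring

-- ===== VERDICT (by name: the statement is the Claim_ definition above) =====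
theorem f_spec : Claim_equal_f := by
  intro a b _
  unfold Spec_f f f_alt
  show (fLoopY b 0 (fLoopX a 0 1 "").2 (fLoopX a 0 1 "").1).1 = _
  rw [loopX_eq a.natAbs a 0 1 "" (by omega)]
  rw [loopY_eq b.natAbs b 0 _ _ (by omega)]
  simp only []
  have hx : (if (0:Int) < a then repStr "WE" a.natAbs else repStr "EW" a.natAbs)
      = (if a > 0 then repStr "WE" a.toNat else if a < 0 then repStr "EW" (-a).toNat else "") := by
    rcases lt_trichotomy a 0 with h | h | h
    · have h1 : ¬ ((0:Int) < a) := by omega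
      have h3 : (-a).toNat = a.natAbs := by omega
      simp only [if_neg h1, if_pos h, h3]
    · subst h; simp [repStr]
    · have h3 : a.toNat = a.natAbs := by omega
      simp only [if_pos h, h3]
  have hy : (if (0:Int) < b then repStr "SN" b.natAbs else repStr "NS" b.natAbs)
      = (if b > 0 then repStr "SN" b.toNat else if b < 0 then repStr "NS" (-b).toNat else "") := by
    rcases lt_trichotomy b 0 with h | h | h
    · have h1 : ¬ ((0:Int) < b) := by omega
      have h3 : (-b).toNat = b.natAbs := by omega
      simp only [if_neg h1, if_pos h, h3]
    · subst h; simp [repStr]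
    · have h3 : b.toNat = b.natAbs := by omega
      simp only [if_pos h, h3]
  rw [← hx, ← hy]
  simp
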